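-- pv_equiv track=rewrite | github.com/shadow4424/Automated-Marking-System-for-Web-Development-Coursework | ams/tools/export_figures.py | _normalise_buckets
-- ===== SOURCE A (Python) =====
-- from typing import Dict, Iterable, List, Mapping, Sequence
--
-- def _normalise_buckets(buckets: Mapping[str, int]) -> Dict[str, int]:
--     agg = {"0.0": 0, "0.5": 0, "1.0": 0}
--     for key, val in buckets.items():
--         label = str(key).lower()
--         target = "0.0"
--         if "0.5" in label or "partial" in label or "0-0.5" in label:
--             target = "0.5"
--         elif ("1" in label or "full" in label) and "0.5" not in label and "partial" not in label:
--             target = "1.0"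
--         agg[target] = agg.get(target, 0) + int(val or 0)
--     return agg
-- ===== SOURCE B (Python) =====
-- def _normalise_buckets(buckets):
--     items = [(str(k).lower(), int(v or 0)) for k, v in buckets.items()]
--
--     def half(label):
--         return "0.5" in label or "partial" in label or "0-0.5" in label
--
--     def full(label):
--         return ("1" in label or "full" in label) and not half(label)
--
--     return {
--         "0.0": sum(v for l, v in items if not half(l) and not full(l)),
--         "0.5": sum(v for l, v in items if half(l)),
--         "1.0": sum(v for l, v in items if full(l)),
--     }
-- ===== Notes on version B (the rewrite author's own statement) =====
-- stated objective: simpler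
-- what changed: Replaced the classify-then-accumulate dict-mutation loop with a dict literal of three independent filtered sums over the normalized items, making each bucket's predicate explicit and dropping the mutable accumulator.
import Mathlib
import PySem

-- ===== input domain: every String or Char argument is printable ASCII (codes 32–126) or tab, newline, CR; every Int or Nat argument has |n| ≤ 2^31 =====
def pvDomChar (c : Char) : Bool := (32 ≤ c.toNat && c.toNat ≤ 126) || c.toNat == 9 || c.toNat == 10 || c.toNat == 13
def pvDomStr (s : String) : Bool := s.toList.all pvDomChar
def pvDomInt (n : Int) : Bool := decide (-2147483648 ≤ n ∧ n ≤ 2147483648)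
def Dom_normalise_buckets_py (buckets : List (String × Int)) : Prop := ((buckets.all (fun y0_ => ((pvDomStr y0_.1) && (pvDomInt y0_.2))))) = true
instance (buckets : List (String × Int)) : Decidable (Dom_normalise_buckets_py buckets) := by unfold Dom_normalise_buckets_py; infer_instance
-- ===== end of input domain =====

-- B replaces A's single classify-and-accumulate mutation loop by a dict literal of three
-- independent filtered sums (objective: simpler); return values agree on every input.

-- ===== PORT A =====
-- loop body of A's for-loop, kept as a helper (state = the agg dict)
def pvStepA (agg : PySem.Dict String Int) (kv : String × Int) : PySem.Dict String Int :=
  let label := PySem.Str.lower kv.1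
  let target := "0.0"
  let target :=
    if PySem.Str.isIn "0.5" label || PySem.Str.isIn "partial" label || PySem.Str.isIn "0-0.5" label then
      "0.5"
    else if (PySem.Str.isIn "1" label || PySem.Str.isIn "full" label)
            && !(PySem.Str.isIn "0.5" label) && !(PySem.Str.isIn "partial" label) then
      "1.0"
    else target
  agg.insert target (agg.getD target 0 + (if kv.2 == 0 then 0 else kv.2))  -- int(val or 0)

def normalise_buckets_py (buckets : List (String × Int)) : List (String × Int) :=
  let agg : PySem.Dict String Int := PySem.Dict.mk [("0.0", 0), ("0.5", 0), ("1.0", 0)]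
  (buckets.foldl pvStepA agg).items

-- ===== PORT B =====
def pvHalf (label : String) : Bool :=
  PySem.Str.isIn "0.5" label || PySem.Str.isIn "partial" label || PySem.Str.isIn "0-0.5" label

def pvFull (label : String) : Bool :=
  (PySem.Str.isIn "1" label || PySem.Str.isIn "full" label) && !pvHalf label

def normalise_buckets_py_alt (buckets : List (String × Int)) : List (String × Int) :=
  let items := buckets.map (fun kv => (PySem.Str.lower kv.1, if kv.2 == 0 then (0 : Int) else kv.2))
  [("0.0", ((items.filter (fun p => !pvHalf p.1 && !pvFull p.1)).map (·.2)).sum),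
   ("0.5", ((items.filter (fun p => pvHalf p.1)).map (·.2)).sum),
   ("1.0", ((items.filter (fun p => pvFull p.1)).map (·.2)).sum)]

-- ===== PRECONDITION & SPEC =====
def Spec_normalise_buckets_py (buckets : List (String × Int)) (out : List (String × Int)) : Prop := out = normalise_buckets_py_alt buckets
instance (buckets : List (String × Int)) (out : List (String × Int)) : Decidable (Spec_normalise_buckets_py buckets out) := by unfold Spec_normalise_buckets_py; infer_instance

-- ===== CLAIM (what is proved, stated in full; the proofs are below) =====
def Claim_equal_normalise_buckets_py : Prop := ∀ (buckets : List (String × Int)), Dom_normalise_buckets_py buckets → Spec_normalise_buckets_py buckets (normalise_buckets_py buckets)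

-- ===== LEMMAS AND PROOFS =====

-- A's loop body classifies into exactly one slot: characterize one step as three guarded additions
theorem pvStepA_eq (x y z : Int) (kv : String × Int) :
    pvStepA (PySem.Dict.mk [("0.0", x), ("0.5", y), ("1.0", z)]) kv =
      PySem.Dict.mk
        [("0.0", x + (if !pvHalf (PySem.Str.lower kv.1) && !pvFull (PySem.Str.lower kv.1) then (if kv.2 == 0 then 0 else kv.2) else 0)),
         ("0.5", y + (if pvHalf (PySem.Str.lower kv.1) then (if kv.2 == 0 then 0 else kv.2) else 0)),
         ("1.0", z + (if pvFull (PySem.Str.lower kv.1) then (if kv.2 == 0 then 0 else kv.2) else 0))] := by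
  unfold pvStepA pvFull pvHalf
  cases h1 : PySem.Str.isIn "0.5" (PySem.Str.lower kv.1) <;>
  cases h2 : PySem.Str.isIn "partial" (PySem.Str.lower kv.1) <;>
  cases h3 : PySem.Str.isIn "0-0.5" (PySem.Str.lower kv.1) <;>
  cases h4 : PySem.Str.isIn "1" (PySem.Str.lower kv.1) <;>
  cases h5 : PySem.Str.isIn "full" (PySem.Str.lower kv.1) <;>
    simp only [h1, h2, h3, h4, h5, Bool.false_or, Bool.true_or, Bool.or_true, Bool.or_false,
      Bool.not_false, Bool.not_true, Bool.true_and, Bool.false_and, Bool.and_true, Bool.and_false,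
      if_true, if_false] <;>
    simp [PySem.Dict.insert, PySem.Dict.getD, PySem.Dict.get?, PySem.Dict.contains, List.find?]

-- the loop invariant: folding A's step over l adds B's three filtered sums to the three slots
theorem pvLoopA (l : List (String × Int)) : ∀ x y z : Int,
    (l.foldl pvStepA (PySem.Dict.mk [("0.0", x), ("0.5", y), ("1.0", z)])).items =
      (let items := l.map (fun kv => (PySem.Str.lower kv.1, if kv.2 == 0 then (0 : Int) else kv.2))
       [("0.0", x + ((items.filter (fun p => !pvHalf p.1 && !pvFull p.1)).map (·.2)).sum),
        ("0.5", y + ((items.filter (fun p => pvHalf p.1)).map (·.2)).sum),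
        ("1.0", z + ((items.filter (fun p => pvFull p.1)).map (·.2)).sum)]) := by
  induction l with
  | nil => intro x y z; simp
  | cons kv t ih =>
      intro x y z
      rw [List.foldl_cons, pvStepA_eq, ih]
      by_cases hH : pvHalf (PySem.Str.lower kv.1)
      · have hF : pvFull (PySem.Str.lower kv.1) = false := by simp [pvFull, hH]
        simp only [List.map_cons, List.filter_cons, hH, hF]
        simp
        ring
      · by_cases hF : pvFull (PySem.Str.lower kv.1)
        · simp only [List.map_cons, List.filter_cons, hH, hF, Bool.not_true, Bool.not_false,
            Bool.and_false, Bool.true_and, Bool.false_and, Bool.and_true]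
          simp [hH, hF]
          ring
        · simp only [List.map_cons, List.filter_cons, hH, hF, Bool.not_true, Bool.not_false,
            Bool.and_false, Bool.true_and, Bool.false_and, Bool.and_true]
          simp [hH, hF]
          ring

-- ===== VERDICT (by name: the statement is the Claim_ definition above) =====
theorem normalise_buckets_py_spec : Claim_equal_normalise_buckets_py := by
  intro buckets _
  unfold Spec_normalise_buckets_py normalise_buckets_py normalise_buckets_py_alt
  simpa using pvLoopA buckets 0 0 0
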